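-- pv_equiv track=rewrite | github.com/Espivc/ming-qimendunjia | core/bazi_calculator.py | get_stem_for_ten_god
-- ===== SOURCE A (Python) =====
-- HEAVENLY_STEMS = ['Jia', 'Yi', 'Bing', 'Ding', 'Wu', 'Ji', 'Geng', 'Xin', 'Ren', 'Gui']
--
-- STEM_ELEMENTS = {
--     'Jia': 'Wood', 'Yi': 'Wood',
--     'Bing': 'Fire', 'Ding': 'Fire',
--     'Wu': 'Earth', 'Ji': 'Earth',
--     'Geng': 'Metal', 'Xin': 'Metal',
--     'Ren': 'Water', 'Gui': 'Water'
-- }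
--
-- STEM_POLARITY = {
--     'Jia': 'Yang', 'Yi': 'Yin',
--     'Bing': 'Yang', 'Ding': 'Yin',
--     'Wu': 'Yang', 'Ji': 'Yin',
--     'Geng': 'Yang', 'Xin': 'Yin',
--     'Ren': 'Yang', 'Gui': 'Yin'
-- }
--
-- PRODUCTIVE_CYCLE = {
--     'Wood': 'Fire',
--     'Fire': 'Earth',
--     'Earth': 'Metal',
--     'Metal': 'Water',
--     'Water': 'Wood',
-- }
--
-- PRODUCED_BY = {
--     'Wood': 'Water',
--     'Fire': 'Wood',
--     'Earth': 'Fire',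
--     'Metal': 'Earth',
--     'Water': 'Metal',
-- }
--
-- CONTROLLING_CYCLE = {
--     'Wood': 'Earth',
--     'Earth': 'Water',
--     'Water': 'Fire',
--     'Fire': 'Metal',
--     'Metal': 'Wood',
-- }
--
-- CONTROLLED_BY = {
--     'Wood': 'Metal',
--     'Fire': 'Water',
--     'Earth': 'Wood',
--     'Metal': 'Fire',
--     'Water': 'Earth',
-- }
--
-- def get_stem_for_ten_god(day_master: str, ten_god: str) -> str:
--     """
--     Get the Heavenly Stem that represents a specific Ten God for a given Day Master.
--     """
--     dm_element = STEM_ELEMENTS[day_master]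
--     dm_polarity = STEM_POLARITY[day_master]
--
--     # Element relationships
--     same = dm_element
--     produces = PRODUCTIVE_CYCLE[dm_element]  # Output
--     controls = CONTROLLING_CYCLE[dm_element]  # Wealth
--     controlled_by = CONTROLLED_BY[dm_element]  # Power
--     produced_by = PRODUCED_BY[dm_element]  # Resource
--
--     # Find the stem based on Ten God type
--     target_element = None
--     same_polarity = True
--
--     if ten_god == 'Friend':
--         target_element, same_polarity = same, True
--     elif ten_god == 'Rob Wealth':
--         target_element, same_polarity = same, False
--     elif ten_god == 'Eating God':
--         target_element, same_polarity = produces, True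
--     elif ten_god == 'Hurting Officer':
--         target_element, same_polarity = produces, False
--     elif ten_god == 'Indirect Wealth':
--         target_element, same_polarity = controls, True
--     elif ten_god == 'Direct Wealth':
--         target_element, same_polarity = controls, False
--     elif ten_god == 'Seven Killings':
--         target_element, same_polarity = controlled_by, True
--     elif ten_god == 'Direct Officer':
--         target_element, same_polarity = controlled_by, False
--     elif ten_god == 'Indirect Resource':
--         target_element, same_polarity = produced_by, True
--     elif ten_god == 'Direct Resource':
--         target_element, same_polarity = produced_by, False
--
--     if not target_element:
--         return ''
--
--     # Find the stem with matching element and polarity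
--     target_pol = dm_polarity if same_polarity else ('Yin' if dm_polarity == 'Yang' else 'Yang')
--
--     for stem in HEAVENLY_STEMS:
--         if STEM_ELEMENTS[stem] == target_element and STEM_POLARITY[stem] == target_pol:
--             return stem
--
--     return ''
-- ===== SOURCE B (Python) =====
-- HEAVENLY_STEMS = ['Jia', 'Yi', 'Bing', 'Ding', 'Wu', 'Ji', 'Geng', 'Xin', 'Ren', 'Gui']
--
-- # ten god -> (element offset along the productive cycle, polarity flip)
-- TEN_GOD_CODE = {
--     'Friend': (0, 0), 'Rob Wealth': (0, 1),
--     'Eating God': (1, 0), 'Hurting Officer': (1, 1),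
--     'Indirect Wealth': (2, 0), 'Direct Wealth': (2, 1),
--     'Seven Killings': (3, 0), 'Direct Officer': (3, 1),
--     'Indirect Resource': (4, 0), 'Direct Resource': (4, 1),
-- }
--
-- def get_stem_for_ten_god(day_master: str, ten_god: str) -> str:
--     d = HEAVENLY_STEMS.index(day_master)
--     code = TEN_GOD_CODE.get(ten_god)
--     if code is None:
--         return ''
--     off, flip = code
--     return HEAVENLY_STEMS[2 * ((d // 2 + off) % 5) + (d + flip) % 2]
-- ===== Notes on version B (the rewrite author's own statement) =====
-- stated objective: alternative
-- what changed: Replaces A's five element-relationship dicts, the ten-branch elif chain and the final linear scan over HEAVENLY_STEMS by a closed-form index computation: each ten god is a (cycle offset, polarity flip) pair applied to the day master's stem index modulo the five-element cycle.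
-- outside the precondition, e.g. on get_stem_for_ten_god('Foo', 'Friend'): A raises KeyError, B raises ValueError
import Mathlib
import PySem

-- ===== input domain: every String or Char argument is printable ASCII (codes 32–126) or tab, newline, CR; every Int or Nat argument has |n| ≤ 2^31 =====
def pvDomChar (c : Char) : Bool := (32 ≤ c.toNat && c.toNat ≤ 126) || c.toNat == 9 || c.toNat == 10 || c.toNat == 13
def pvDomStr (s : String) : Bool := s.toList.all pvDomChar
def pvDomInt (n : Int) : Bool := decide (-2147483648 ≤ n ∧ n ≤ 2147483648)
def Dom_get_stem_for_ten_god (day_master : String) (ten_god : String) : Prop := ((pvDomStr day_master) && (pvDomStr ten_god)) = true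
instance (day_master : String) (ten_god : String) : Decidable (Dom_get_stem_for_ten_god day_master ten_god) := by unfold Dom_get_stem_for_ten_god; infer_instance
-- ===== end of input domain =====

-- B replaces A's five relationship dicts and linear scan of the stems by modular
-- arithmetic on the stem index (objective: alternative closed form; no speed claim).

-- ===== PORT A =====
def pvStems : List String := ["Jia", "Yi", "Bing", "Ding", "Wu", "Ji", "Geng", "Xin", "Ren", "Gui"]

def pvStemElements : PySem.Dict String String := PySem.Dict.ofList
  [("Jia", "Wood"), ("Yi", "Wood"), ("Bing", "Fire"), ("Ding", "Fire"),
   ("Wu", "Earth"), ("Ji", "Earth"), ("Geng", "Metal"), ("Xin", "Metal"),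
   ("Ren", "Water"), ("Gui", "Water")]

def pvStemPolarity : PySem.Dict String String := PySem.Dict.ofList
  [("Jia", "Yang"), ("Yi", "Yin"), ("Bing", "Yang"), ("Ding", "Yin"),
   ("Wu", "Yang"), ("Ji", "Yin"), ("Geng", "Yang"), ("Xin", "Yin"),
   ("Ren", "Yang"), ("Gui", "Yin")]

def pvProductiveCycle : PySem.Dict String String := PySem.Dict.ofList
  [("Wood", "Fire"), ("Fire", "Earth"), ("Earth", "Metal"), ("Metal", "Water"), ("Water", "Wood")]

def pvProducedBy : PySem.Dict String String := PySem.Dict.ofList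
  [("Wood", "Water"), ("Fire", "Wood"), ("Earth", "Fire"), ("Metal", "Earth"), ("Water", "Metal")]

def pvControllingCycle : PySem.Dict String String := PySem.Dict.ofList
  [("Wood", "Earth"), ("Earth", "Water"), ("Water", "Fire"), ("Fire", "Metal"), ("Metal", "Wood")]

def pvControlledBy : PySem.Dict String String := PySem.Dict.ofList
  [("Wood", "Metal"), ("Fire", "Water"), ("Earth", "Wood"), ("Metal", "Fire"), ("Water", "Earth")]

-- Literal port of A. STEM_ELEMENTS[day_master] / STEM_POLARITY[day_master] raise KeyError
-- for an unknown day master (the `none` branch, excluded by Pre_); the cycle lookups are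
-- keyed by a value of those dicts and always succeed, so `.getD ""` there is unreachable.
def get_stem_for_ten_god (day_master : String) (ten_god : String) : String :=
  match pvStemElements.get? day_master, pvStemPolarity.get? day_master with
  | some dm_element, some dm_polarity =>
    let same := dm_element
    let produces := (pvProductiveCycle.get? dm_element).getD ""
    let controls := (pvControllingCycle.get? dm_element).getD ""
    let controlled_by := (pvControlledBy.get? dm_element).getD ""
    let produced_by := (pvProducedBy.get? dm_element).getD ""
    let tp : Option String × Bool :=
      if ten_god == "Friend" then (some same, true)
      else if ten_god == "Rob Wealth" then (some same, false)
      else if ten_god == "Eating God" then (some produces, true)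
      else if ten_god == "Hurting Officer" then (some produces, false)
      else if ten_god == "Indirect Wealth" then (some controls, true)
      else if ten_god == "Direct Wealth" then (some controls, false)
      else if ten_god == "Seven Killings" then (some controlled_by, true)
      else if ten_god == "Direct Officer" then (some controlled_by, false)
      else if ten_god == "Indirect Resource" then (some produced_by, true)
      else if ten_god == "Direct Resource" then (some produced_by, false)
      else (none, true)
    match tp.1 with
    | none => ""
    | some target_element =>
      let target_pol := if tp.2 then dm_polarity else (if dm_polarity == "Yang" then "Yin" else "Yang")
      ((pvStems.find? (fun stem =>
          ((pvStemElements.get? stem).getD "" == target_element) &&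
          ((pvStemPolarity.get? stem).getD "" == target_pol))).getD "")
  | _, _ => ""  -- Python raises KeyError here; excluded by Pre_

-- ===== PORT B =====
def pvTenGodCode : PySem.Dict String (Int × Int) := PySem.Dict.ofList
  [("Friend", (0, 0)), ("Rob Wealth", (0, 1)),
   ("Eating God", (1, 0)), ("Hurting Officer", (1, 1)),
   ("Indirect Wealth", (2, 0)), ("Direct Wealth", (2, 1)),
   ("Seven Killings", (3, 0)), ("Direct Officer", (3, 1)),
   ("Indirect Resource", (4, 0)), ("Direct Resource", (4, 1))]

-- Literal port of B. HEAVENLY_STEMS.index raises ValueError for an unknown day master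
-- (the `none` branch, excluded by Pre_); the computed index is always in 0..9, so the
-- final `.getD ""` is unreachable.
def get_stem_for_ten_god_alt (day_master : String) (ten_god : String) : String :=
  match PySem.List.index? pvStems day_master with
  | none => ""
  | some dNat =>
    let d : Int := (dNat : Int)
    match pvTenGodCode.get? ten_god with
    | none => ""
    | some code =>
      (PySem.List.pyGet? pvStems
        (2 * (PySem.Int.mod (PySem.Int.floordiv d 2 + code.1) 5) + PySem.Int.mod (d + code.2) 2)).getD ""

-- ===== PRECONDITION & SPEC =====
-- Pre_ excludes exactly the inputs where A raises KeyError: day_master not a heavenly stem.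
def Pre_get_stem_for_ten_god (day_master : String) (ten_god : String) : Prop :=
  day_master ∈ pvStems
instance (day_master : String) (ten_god : String) : Decidable (Pre_get_stem_for_ten_god day_master ten_god) := by unfold Pre_get_stem_for_ten_god; infer_instance

def pvWitness_get_stem_for_ten_god : String × String := ("Bing", "Direct Officer")

def Spec_get_stem_for_ten_god (day_master : String) (ten_god : String) (out : String) : Prop := out = get_stem_for_ten_god_alt day_master ten_god
instance (day_master : String) (ten_god : String) (out : String) : Decidable (Spec_get_stem_for_ten_god day_master ten_god out) := by unfold Spec_get_stem_for_ten_god; infer_instance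

-- ===== CLAIM (what is proved, stated in full; the proofs are below) =====
def Claim_equal_get_stem_for_ten_god : Prop := ∀ (day_master : String) (ten_god : String), Dom_get_stem_for_ten_god day_master ten_god → Pre_get_stem_for_ten_god day_master ten_god → Spec_get_stem_for_ten_god day_master ten_god (get_stem_for_ten_god day_master ten_god)

-- ===== LEMMAS AND PROOFS =====
lemma pv_main (day_master ten_god : String) (h : day_master ∈ pvStems) :
    get_stem_for_ten_god day_master ten_god = get_stem_for_ten_god_alt day_master ten_god := by
  have h' : day_master = "Jia" ∨ day_master = "Yi" ∨ day_master = "Bing" ∨ day_master = "Ding" ∨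
      day_master = "Wu" ∨ day_master = "Ji" ∨ day_master = "Geng" ∨ day_master = "Xin" ∨
      day_master = "Ren" ∨ day_master = "Gui" := by simpa [pvStems] using h
  clear h
  rcases h' with rfl|rfl|rfl|rfl|rfl|rfl|rfl|rfl|rfl|rfl <;>
  · by_cases h0 : ten_god = "Friend"; · subst h0; decide
    by_cases h1 : ten_god = "Rob Wealth"; · subst h1; decide
    by_cases h2 : ten_god = "Eating God"; · subst h2; decide
    by_cases h3 : ten_god = "Hurting Officer"; · subst h3; decide
    by_cases h4 : ten_god = "Indirect Wealth"; · subst h4; decide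
    by_cases h5 : ten_god = "Direct Wealth"; · subst h5; decide
    by_cases h6 : ten_god = "Seven Killings"; · subst h6; decide
    by_cases h7 : ten_god = "Direct Officer"; · subst h7; decide
    by_cases h8 : ten_god = "Indirect Resource"; · subst h8; decide
    by_cases h9 : ten_god = "Direct Resource"; · subst h9; decide
    simp [get_stem_for_ten_god, get_stem_for_ten_god_alt, pvTenGodCode,
      pvStemElements, pvStemPolarity, PySem.Dict.ofList, PySem.Dict.update,
      PySem.Dict.get?_insert_of_ne, h0, h1, h2, h3, h4, h5, h6, h7, h8, h9]
    rfl

-- ===== VERDICT (by name: the statement is the Claim_ definition above) =====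
theorem get_stem_for_ten_god_spec : Claim_equal_get_stem_for_ten_god := by
  intro dm tg _ hpre
  exact pv_main dm tg hpre
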